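-- pv_equiv track=rewrite | github.com/cinc98/SOTIS | backend/flaskapp/kst_service.py | get_list_question_iscorrect
-- ===== SOURCE A (Python) =====
-- def get_list_question_iscorrect(dic):
--     idfDict = {}
--     for dicv in dic:
--         if dicv['question_id'] in idfDict:
--             idfDict[dicv['question_id']].append(dicv['correct'])
--         else:
--             idfDict[dicv['question_id']] = [dicv['correct']]
--
--     question_correct = []
--     for key, value in idfDict.items():
--         if False in value:
--             question_correct.append(0)
--         else:
--             question_correct.append(1)
--
--     return question_correct
-- ===== SOURCE B (Python) =====
-- def get_list_question_iscorrect(dic):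
--     ok = {}
--     for dicv in dic:
--         this_ok = dicv['correct'] != False
--         q = dicv['question_id']
--         ok[q] = ok.get(q, True) and this_ok
--     return [1 if v else 0 for v in ok.values()]
-- ===== Notes on version B (the rewrite author's own statement) =====
-- stated objective: simpler
-- what changed: B keeps one aggregate boolean per question_id, folded in a single pass with dict.get, instead of A's grouping of all answers into per-key lists that a second loop then scans for False.
import Mathlib
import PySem

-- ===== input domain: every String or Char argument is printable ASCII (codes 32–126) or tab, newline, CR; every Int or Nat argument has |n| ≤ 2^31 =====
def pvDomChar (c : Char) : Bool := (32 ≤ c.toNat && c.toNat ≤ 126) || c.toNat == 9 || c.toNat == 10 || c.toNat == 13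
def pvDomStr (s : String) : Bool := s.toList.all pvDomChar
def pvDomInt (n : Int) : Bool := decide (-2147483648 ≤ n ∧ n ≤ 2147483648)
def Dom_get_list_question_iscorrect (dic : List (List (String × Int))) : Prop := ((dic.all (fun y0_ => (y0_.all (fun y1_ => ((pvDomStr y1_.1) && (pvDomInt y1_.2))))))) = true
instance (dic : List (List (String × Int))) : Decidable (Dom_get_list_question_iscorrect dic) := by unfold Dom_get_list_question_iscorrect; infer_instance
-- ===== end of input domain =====

-- B merges A's two passes into one fold keeping a single 'still correct' Bool per question_id
-- instead of a list of all answers; objective: simpler (same O(n) cost).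

-- record lookup dicv[k]: first match in the association list; exact under Pre_ (the key is present)
def pvRecGet (r : List (String × Int)) (k : String) : Int :=
  ((r.find? (fun p => p.1 == k)).map (·.2)).getD 0

-- ===== PORT A =====
def get_list_question_iscorrect (dic : List (List (String × Int))) : List Int :=
  let idfDict : PySem.Dict Int (List Int) :=
    dic.foldl (fun d dicv =>
      if d.contains (pvRecGet dicv "question_id") then
        d.modify (pvRecGet dicv "question_id") [] (fun v => v ++ [pvRecGet dicv "correct"])
      else
        d.insert (pvRecGet dicv "question_id") [pvRecGet dicv "correct"]) PySem.Dict.empty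
  idfDict.items.foldl (fun acc kv =>
    if kv.2.contains 0 then acc ++ [(0 : Int)] else acc ++ [(1 : Int)]) []

-- ===== PORT B =====
def get_list_question_iscorrect_alt (dic : List (List (String × Int))) : List Int :=
  let ok : PySem.Dict Int Bool :=
    dic.foldl (fun d dicv =>
      let this_ok : Bool := decide (pvRecGet dicv "correct" ≠ 0)
      d.modify (pvRecGet dicv "question_id") true (fun b => b && this_ok)) PySem.Dict.empty
  ok.values.map (fun v => if v then (1 : Int) else 0)

-- ===== PRECONDITION & SPEC =====
-- Pre_ excludes records missing the key "question_id" or "correct": there Python A raises KeyError.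
def Pre_get_list_question_iscorrect (dic : List (List (String × Int))) : Prop :=
  (dic.all (fun r => r.any (fun p => p.1 == "question_id") && r.any (fun p => p.1 == "correct"))) = true
instance (dic : List (List (String × Int))) : Decidable (Pre_get_list_question_iscorrect dic) := by
  unfold Pre_get_list_question_iscorrect; infer_instance

def pvWitness_get_list_question_iscorrect : (List (List (String × Int))) :=
  [[("question_id", 1), ("correct", 0)], [("question_id", 2), ("correct", 1)]]

def Spec_get_list_question_iscorrect (dic : List (List (String × Int))) (out : List Int) : Prop := out = get_list_question_iscorrect_alt dic
instance (dic : List (List (String × Int))) (out : List Int) : Decidable (Spec_get_list_question_iscorrect dic out) := by unfold Spec_get_list_question_iscorrect; infer_instance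

-- ===== CLAIM (what is proved, stated in full; the proofs are below) =====
def Claim_equal_get_list_question_iscorrect : Prop := ∀ (dic : List (List (String × Int))), Dom_get_list_question_iscorrect dic → Pre_get_list_question_iscorrect dic → Spec_get_list_question_iscorrect dic (get_list_question_iscorrect dic)

-- ===== LEMMAS AND PROOFS =====

-- the abstraction: B's per-key flag is 'no 0 (False) among the answers A collected for that key'
def pvFlag (p : Int × List Int) : Int × Bool := (p.1, !(p.2.contains 0))

theorem pvFlag_step {aD : PySem.Dict Int (List Int)} {bD : PySem.Dict Int Bool}
    (h : bD.items = aD.items.map pvFlag) (q c : Int) :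
    (bD.modify q true (fun b => b && decide (c ≠ 0))).items
      = (if aD.contains q then aD.modify q [] (fun v => v ++ [c])
         else aD.insert q [c]).items.map pvFlag := by
  have hc : bD.contains q = aD.contains q := by
    simp only [PySem.Dict.contains, h, List.any_map]
    rfl
  have hget : bD.get? q = (aD.get? q).map (fun v => !(v.contains 0)) := by
    simp only [PySem.Dict.get?, h, List.find?_map, Option.map_map]
    rfl
  by_cases hA : aD.contains q = true
  · -- existing key: both sides rewrite the one entry in place
    obtain ⟨v, hv⟩ : ∃ v, aD.get? q = some v := by
      rw [PySem.Dict.contains_eq_isSome_get?] at hA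
      exact Option.isSome_iff_exists.mp hA
    have hbc : bD.contains q = true := by rw [hc]; exact hA
    have hb : bD.getD q true = !(v.contains 0) := by simp [PySem.Dict.getD, hget, hv]
    have ha : aD.getD q [] = v := by simp [PySem.Dict.getD, hv]
    simp only [hA, if_true, PySem.Dict.modify, PySem.Dict.insert, hbc, hb, ha, if_pos]
    rw [h, List.map_map, List.map_map]
    refine List.map_congr_left (fun p _ => ?_)
    simp only [Function.comp, pvFlag]
    by_cases hpq : (p.1 == q) = true
    · simp only [hpq, if_pos]
      refine Prod.ext rfl ?_
      rcases Bool.eq_false_or_eq_true (v.contains 0) with hv0 | hv0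
      · by_cases hc0 : c = 0
        · simp [hv0, hc0]
        · simp [hc0, eq_comm]
      · simp at hv0
        simp [hv0, eq_comm]
    · simp [hpq]
  · -- new key: both sides append
    have hA' : aD.contains q = false := by simp_all
    have hbc : bD.contains q = false := by rw [hc]; exact hA'
    have hnone : aD.get? q = none := by
      rw [PySem.Dict.contains_eq_isSome_get?] at hA'
      exact Option.not_isSome_iff_eq_none.mp (by simp [hA'])
    have hvb : bD.getD q true = true := by simp [PySem.Dict.getD, hget, hnone]
    simp only [hA', PySem.Dict.modify, PySem.Dict.insert, hbc, hvb, Bool.false_eq_true,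
      if_false, Bool.true_and]
    simp only [List.map_append, h, List.map_cons, List.map_nil]
    have hfl : pvFlag (q, [c]) = (q, decide (c ≠ 0)) := by
      by_cases hc0 : c = 0 <;> simp [pvFlag, hc0, eq_comm]
    rw [hfl]

theorem pvFlag_inv (dic : List (List (String × Int)))
    (aD : PySem.Dict Int (List Int)) (bD : PySem.Dict Int Bool)
    (h : bD.items = aD.items.map pvFlag) :
    (dic.foldl (fun d dicv =>
        let this_ok : Bool := decide (pvRecGet dicv "correct" ≠ 0)
        d.modify (pvRecGet dicv "question_id") true (fun b => b && this_ok)) bD).items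
      = (dic.foldl (fun d dicv =>
          if d.contains (pvRecGet dicv "question_id") then
            d.modify (pvRecGet dicv "question_id") [] (fun v => v ++ [pvRecGet dicv "correct"])
          else
            d.insert (pvRecGet dicv "question_id") [pvRecGet dicv "correct"]) aD).items.map pvFlag := by
  induction dic generalizing aD bD with
  | nil => simpa using h
  | cons r rest ih =>
    simp only [List.foldl_cons]
    exact ih _ _ (pvFlag_step h (pvRecGet r "question_id") (pvRecGet r "correct"))

-- ===== VERDICT (by name: the statement is the Claim_ definition above) =====
theorem get_list_question_iscorrect_spec : Claim_equal_get_list_question_iscorrect := by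
  intro dic _ _
  unfold Spec_get_list_question_iscorrect get_list_question_iscorrect get_list_question_iscorrect_alt
  have hinv := pvFlag_inv dic PySem.Dict.empty PySem.Dict.empty rfl
  simp only [PySem.Dict.values, hinv, List.map_map]
  have hfun : (fun (acc : List Int) (kv : Int × List Int) =>
      if kv.2.contains 0 then acc ++ [(0 : Int)] else acc ++ [(1 : Int)])
      = fun acc kv => acc ++ [if kv.2.contains 0 then (0 : Int) else 1] := by
    funext acc kv; split <;> rfl
  rw [hfun, PySem.List.foldl_append_singleton_eq_map]
  simp only [List.nil_append]
  refine List.map_congr_left (fun p _ => ?_)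
  simp only [Function.comp, pvFlag]
  rcases Bool.eq_false_or_eq_true (p.2.contains 0) with h0 | h0 <;> simp [h0]
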